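-- pv_equiv track=rewrite | github.com/artempenteskul/py | python-exercise-stivenson/dicts/old_phone.py | old_phone_keyboard
-- ===== SOURCE A (Python) =====
-- button_to_symbol = {
--     1: ['.', '?', '!', ':'],
--     2: ['A', 'B', 'C'],
--     3: ['D', 'E', 'F'],
--     4: ['G', 'H', 'I'],
--     5: ['J', 'K', 'L'],
--     6: ['M', 'N', 'O'],
--     7: ['P', 'Q', 'R', 'S'],
--     8: ['T', 'U', 'V'],
--     9: ['W', 'X', 'Y', 'Z'],
--     0: [' ']
-- }
--
-- def old_phone_keyboard(text: str):
--     res = ''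
--     for symbol in text:
--         for button in button_to_symbol:
--             if symbol.upper() in button_to_symbol[button]:
--                 symbol_index = button_to_symbol[button].index(symbol.upper()) + 1
--                 res += str(button) * symbol_index
--     return res
-- ===== SOURCE B (Python) =====
-- # One flat keypad layout string; press string derived from positions in it:
-- # each symbol's button digit is the nearest digit to its left in the layout,
-- # and the press count is the distance to that digit.
-- _LAYOUT = "1.?!:2ABC3DEF4GHI5JKL6MNO7PQRS8TUV9WXYZ0 "
--
-- def old_phone_keyboard(text: str):
--     out = []
--     for c in text:
--         i = _LAYOUT.find(c.upper())
--         if i < 0 or _LAYOUT[i].isdigit():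
--             continue
--         d = i - 1
--         while not _LAYOUT[d].isdigit():
--             d -= 1
--         out.append(_LAYOUT[d] * (i - d))
--     return ''.join(out)
-- ===== Notes on version B (the rewrite author's own statement) =====
-- stated objective: faster
-- what changed: B drops the button_to_symbol dict-of-lists entirely: it stores one flat keypad layout string and, per character, finds the symbol's position in it and scans left to the nearest digit, deriving the press string by positional arithmetic (digit * distance) instead of A's per-button membership test plus .index, and joins collected pieces instead of repeated string +=.
import Mathlib
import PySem

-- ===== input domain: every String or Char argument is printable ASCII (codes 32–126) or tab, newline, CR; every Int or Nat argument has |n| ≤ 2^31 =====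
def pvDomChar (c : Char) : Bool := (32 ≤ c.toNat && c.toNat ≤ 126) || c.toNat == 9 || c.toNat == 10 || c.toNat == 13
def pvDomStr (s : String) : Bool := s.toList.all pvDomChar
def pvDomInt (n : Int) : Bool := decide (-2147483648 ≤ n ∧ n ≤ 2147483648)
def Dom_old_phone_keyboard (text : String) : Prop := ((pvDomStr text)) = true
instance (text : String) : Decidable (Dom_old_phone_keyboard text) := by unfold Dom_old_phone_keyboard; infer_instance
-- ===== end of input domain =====

-- B drops the button→symbols table and derives presses by positional arithmetic over one
-- flat keypad layout string (nearest digit to the left × distance) — objective: alternative.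

-- ===== PORT A =====
-- button_to_symbol, in insertion order (symbols are 1-char strings in Python, ported as Char;
-- symbol.upper() on a 1-char ASCII string is PySem.Chars.upperChar, exact on the ASCII domain)
def pvButtons : List (Int × List Char) :=
  [(1, ['.', '?', '!', ':']), (2, ['A', 'B', 'C']), (3, ['D', 'E', 'F']),
   (4, ['G', 'H', 'I']), (5, ['J', 'K', 'L']), (6, ['M', 'N', 'O']),
   (7, ['P', 'Q', 'R', 'S']), (8, ['T', 'U', 'V']), (9, ['W', 'X', 'Y', 'Z']),
   (0, [' '])]

def old_phone_keyboard (text : String) : String :=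
  String.ofList <|
    text.toList.foldl (fun res symbol =>
      pvButtons.foldl (fun res bp =>
        if PySem.Chars.upperChar symbol ∈ bp.2 then
          let symbol_index : Nat := (PySem.List.index? bp.2 (PySem.Chars.upperChar symbol)).getD 0 + 1
          res ++ PySem.List.pyRepeat (PySem.Int.toStr bp.1).toList (symbol_index : Int)
        else res) res) []

-- ===== PORT B =====
-- the flat keypad layout string _LAYOUT
def pvLayout : List Char :=
  ['1', '.', '?', '!', ':', '2', 'A', 'B', 'C', '3', 'D', 'E', 'F',
   '4', 'G', 'H', 'I', '5', 'J', 'K', 'L', '6', 'M', 'N', 'O',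
   '7', 'P', 'Q', 'R', 'S', '8', 'T', 'U', 'V', '9', 'W', 'X', 'Y', 'Z', '0', ' ']

-- the 'while not _LAYOUT[d].isdigit(): d -= 1' backward scan (pvLayout[0] = '1' is a digit,
-- so the d = 0 base case is exactly where the Python loop stops)
def pvBackToDigit : Nat → Nat
  | 0 => 0
  | d + 1 => if PySem.Chars.isdigit (pvLayout.getD (d + 1) ' ') then d + 1 else pvBackToDigit d

-- the loop body for one character c
def pvPress (c : Char) : List Char :=
  let i := PySem.Chars.find pvLayout [PySem.Chars.upperChar c]
  if i < 0 then []
  else if PySem.Chars.isdigit (pvLayout.getD i.toNat ' ') then []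
  else
    let d := pvBackToDigit (i.toNat - 1)
    PySem.List.pyRepeat [pvLayout.getD d ' '] ((i.toNat - d : Nat) : Int)

def old_phone_keyboard_alt (text : String) : String :=
  String.ofList <|
    PySem.Chars.join [] (text.toList.foldl (fun out c => out ++ [pvPress c]) [])

-- ===== PRECONDITION & SPEC =====
def Spec_old_phone_keyboard (text : String) (out : String) : Prop := out = old_phone_keyboard_alt text
instance (text : String) (out : String) : Decidable (Spec_old_phone_keyboard text out) := by unfold Spec_old_phone_keyboard; infer_instance

-- ===== CLAIM (what is proved, stated in full; the proofs are below) =====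
def Claim_equal_old_phone_keyboard : Prop := ∀ (text : String), Dom_old_phone_keyboard text → Spec_old_phone_keyboard text (old_phone_keyboard text)

-- ===== LEMMAS AND PROOFS =====

-- the per-character contribution of A's inner button loop
def pvContrib (u : Char) (bp : Int × List Char) : List Char :=
  if u ∈ bp.2 then
    PySem.List.pyRepeat (PySem.Int.toStr bp.1).toList
      (((PySem.List.index? bp.2 u).getD 0 + 1 : Nat) : Int)
  else []

lemma inner_loop_eq (symbol : Char) (res : List Char) :
    pvButtons.foldl (fun res bp =>
      if PySem.Chars.upperChar symbol ∈ bp.2 then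
        let symbol_index : Nat := (PySem.List.index? bp.2 (PySem.Chars.upperChar symbol)).getD 0 + 1
        res ++ PySem.List.pyRepeat (PySem.Int.toStr bp.1).toList (symbol_index : Int)
      else res) res
    = res ++ pvButtons.flatMap (pvContrib (PySem.Chars.upperChar symbol)) := by
  rw [show (fun res bp =>
      if PySem.Chars.upperChar symbol ∈ bp.2 then
        let symbol_index : Nat := (PySem.List.index? bp.2 (PySem.Chars.upperChar symbol)).getD 0 + 1
        res ++ PySem.List.pyRepeat (PySem.Int.toStr bp.1).toList (symbol_index : Int)
      else res)
    = (fun res bp => res ++ pvContrib (PySem.Chars.upperChar symbol) bp) from by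
      funext res bp; simp [pvContrib]; split_ifs <;> simp]
  exact PySem.List.foldl_append_eq_flatMap _ _ _

-- pvPress c depends only on upperChar c: the same body on the uppercased character
def pvPressBody (u : Char) : List Char :=
  let i := PySem.Chars.find pvLayout [u]
  if i < 0 then []
  else if PySem.Chars.isdigit (pvLayout.getD i.toNat ' ') then []
  else
    let d := pvBackToDigit (i.toNat - 1)
    PySem.List.pyRepeat [pvLayout.getD d ' '] ((i.toNat - d : Nat) : Int)

lemma pvPress_eq (c : Char) : pvPress c = pvPressBody (PySem.Chars.upperChar c) := rfl

-- B's positional-arithmetic press agrees with A's button scan, for every character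
lemma contrib_eq_press (u : Char) :
    pvButtons.flatMap (pvContrib u) = pvPressBody u := by
  by_cases hmem : u ∈ pvLayout
  · fin_cases hmem <;> decide
  · have hfind : PySem.Chars.find pvLayout [u] = -1 := by
      rw [PySem.Chars.find_eq_neg_one_iff]
      exact fun h => hmem (h.subset (by simp))
    have hA : pvButtons.flatMap (pvContrib u) = [] := by
      have : ∀ bp ∈ pvButtons, pvContrib u bp = [] := by
        intro bp hbp
        have : u ∉ bp.2 := by
          intro hu; apply hmem
          fin_cases hbp <;> simp_all [pvLayout]
        simp [pvContrib, this]
      simp [List.flatMap_eq_nil_iff.mpr this]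
    rw [hA, pvPressBody, hfind]
    norm_num

lemma join_nil_eq_flatten (xs : List (List Char)) :
    PySem.Chars.join [] xs = xs.flatten := by
  induction xs with
  | nil => simp [PySem.Chars.join, List.intercalate]
  | cons a t ih =>
    cases t <;> simp_all [PySem.Chars.join, List.intercalate, List.intersperse]

lemma outer_eq (l : List Char) (acc : List Char) :
    l.foldl (fun res symbol =>
      pvButtons.foldl (fun res bp =>
        if PySem.Chars.upperChar symbol ∈ bp.2 then
          let symbol_index : Nat := (PySem.List.index? bp.2 (PySem.Chars.upperChar symbol)).getD 0 + 1
          res ++ PySem.List.pyRepeat (PySem.Int.toStr bp.1).toList (symbol_index : Int)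
        else res) res) acc
    = acc ++ (l.map (fun c => pvPress c)).flatten := by
  induction l generalizing acc with
  | nil => simp
  | cons c t ih =>
    simp only [List.foldl_cons, List.map_cons, List.flatten_cons]
    rw [inner_loop_eq, contrib_eq_press, ← pvPress_eq, ih, List.append_assoc]

theorem old_phone_keyboard_spec_aux (text : String) :
    old_phone_keyboard text = old_phone_keyboard_alt text := by
  unfold old_phone_keyboard old_phone_keyboard_alt
  rw [outer_eq, join_nil_eq_flatten, PySem.List.foldl_append_singleton_eq_map]
  simp

-- ===== VERDICT (by name: the statement is the Claim_ definition above) =====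
theorem old_phone_keyboard_spec : Claim_equal_old_phone_keyboard := by
  intro text _
  unfold Spec_old_phone_keyboard
  exact old_phone_keyboard_spec_aux text
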